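-- pv_equiv track=rewrite | github.com/rhantz/573_affect_recognition | src/preprocess_urdu.py | get_word_counts
-- ===== SOURCE A (Python) =====
-- def get_word_counts(text: str) -> str:
--     """
--     Given text, returns a string of word counts
--     Args:
--         text: string
--     Returns:
--         feature_string: an alphabetized string of words from input formatted word1:count1 word2:count2 etc
--     """
--     tokens = {}
--     for item in text.split():
--         if item in tokens:
--             tokens[item] += 1
--         else:
--             tokens[item] = 1
--     feature_string = ''
--     for k in sorted(tokens.keys()):
--         feature_string += k + ':' + str(tokens[k]) + ' '
--     return feature_string
-- ===== SOURCE B (Python) =====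
-- def get_word_counts(text: str) -> str:
--     """
--     Given text, returns a string of word counts
--     Args:
--         text: string
--     Returns:
--         feature_string: an alphabetized string of words from input formatted word1:count1 word2:count2 etc
--     """
--     words = sorted(text.split())
--     parts = []
--     i, n = 0, len(words)
--     while i < n:
--         j = i
--         while j < n and words[j] == words[i]:
--             j += 1
--         parts.append(words[i] + ':' + str(j - i) + ' ')
--         i = j
--     return ''.join(parts)
-- ===== Notes on version B (the rewrite author's own statement) =====
-- stated objective: alternative
-- what changed: Replaces the dict-count-then-sort-keys strategy by sorting all tokens once and emitting one entry per run of equal adjacent words in a single run-length scan, joining the parts at the end.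
import Mathlib
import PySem

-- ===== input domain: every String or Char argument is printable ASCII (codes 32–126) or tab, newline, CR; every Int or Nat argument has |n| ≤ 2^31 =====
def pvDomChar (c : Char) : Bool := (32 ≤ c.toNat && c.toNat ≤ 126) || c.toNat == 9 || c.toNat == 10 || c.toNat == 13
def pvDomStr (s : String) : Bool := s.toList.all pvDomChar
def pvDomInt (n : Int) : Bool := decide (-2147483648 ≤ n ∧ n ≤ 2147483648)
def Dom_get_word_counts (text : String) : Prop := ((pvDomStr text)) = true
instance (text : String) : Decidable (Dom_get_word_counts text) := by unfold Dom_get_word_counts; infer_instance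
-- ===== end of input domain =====

-- B sorts all tokens once and emits one entry per run of equal adjacent words (run-length scan),
-- instead of A's dict counting followed by sorting the keys; same output, similar cost (alternative).

-- ===== PORT A =====
-- 'tokens[k]' with k drawn from tokens.keys() is ported as getD with default 0 (the key is always present).
def get_word_counts (text : String) : String :=
  let tokens := (PySem.Str.split₀ text).foldl
    (fun d item =>
      if d.contains item then d.insert item (d.getD item 0 + 1)
      else d.insert item (1 : Int))
    PySem.Dict.empty
  (PySem.List.sorted tokens.keys (fun k => k)).foldl
    (fun fs k => fs ++ k ++ ":" ++ PySem.Int.toStr (tokens.getD k 0) ++ " ") ""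

-- ===== PORT B =====
-- the outer/inner while loops of Source B: one entry per run of equal adjacent words;
-- the inner while (advance j over equal words) is the takeWhile/dropWhile split of the rest.
def pvRuns (l : List String) : List String :=
  match l with
  | [] => []
  | w :: rest =>
      (w ++ ":" ++ PySem.Int.toStr ((rest.takeWhile (fun x => x == w)).length + 1) ++ " ")
        :: pvRuns (rest.dropWhile (fun x => x == w))
termination_by l.length
decreasing_by simpa using Nat.lt_succ_of_le (List.length_dropWhile_le _ rest)

def get_word_counts_alt (text : String) : String :=
  let words := PySem.List.sorted (PySem.Str.split₀ text) (fun w => w)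
  (pvRuns words).foldl (fun a s => a ++ s) ""

-- ===== PRECONDITION & SPEC =====
def Spec_get_word_counts (text : String) (out : String) : Prop := out = get_word_counts_alt text
instance (text : String) (out : String) : Decidable (Spec_get_word_counts text out) := by unfold Spec_get_word_counts; infer_instance

-- ===== CLAIM (what is proved, stated in full; the proofs are below) =====
def Claim_equal_get_word_counts : Prop := ∀ (text : String), Dom_get_word_counts text → Spec_get_word_counts text (get_word_counts text)

-- ===== LEMMAS AND PROOFS =====

-- one output entry "w:count "
def pvEntry (k : String) (n : Int) : String := k ++ ":" ++ PySem.Int.toStr n ++ " "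

-- A's counting loop is collections.Counter
lemma pvCounter_eq (ws : List String) :
    ws.foldl (fun d item =>
      if d.contains item then d.insert item (d.getD item 0 + 1)
      else d.insert item (1 : Int)) PySem.Dict.empty = PySem.Dict.counter ws := by
  rw [← PySem.Dict.foldl_insert_getD_add_one_eq_counter]
  refine PySem.List.foldl_congr_mem _ _ _ _ ?_
  intro acc x _
  by_cases h : acc.contains x
  · simp [h]
  · simp only [Bool.not_eq_true] at h
    simp [h, PySem.Dict.getD_of_not_contains _ _ h]

-- folding ++ over a mapped list is folding the composed step
lemma pvFoldl_append_map {α : Type} (f : α → String) :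
    ∀ (u : List α) (a : String),
      (u.map f).foldl (fun s x => s ++ x) a = u.foldl (fun s x => s ++ f x) a := by
  intro u
  induction u with
  | nil => intro a; rfl
  | cons x xs ih => intro a; simp [List.foldl, ih]

-- run-length scan of a ≤-sorted list = one entry per distinct element, in strictly increasing order
lemma pvRuns_spec : ∀ (l : List String), l.Pairwise (· ≤ ·) →
    ∃ u : List String,
      pvRuns l = u.map (fun k => pvEntry k (l.count k)) ∧
      u.Pairwise (· < ·) ∧ u.Nodup ∧ (∀ x, x ∈ u ↔ x ∈ l) := by
  intro l
  induction l using pvRuns.induct with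
  | case1 =>
    intro _
    exact ⟨[], by rw [pvRuns]; rfl, List.Pairwise.nil, List.nodup_nil, by simp⟩
  | case2 w rest ih =>
    intro hp
    have hwle : ∀ x ∈ rest, w ≤ x := (List.pairwise_cons.mp hp).1
    have hpr : rest.Pairwise (· ≤ ·) := hp.of_cons
    have hpd : (rest.dropWhile (fun x => x == w)).Pairwise (· ≤ ·) :=
      hpr.sublist (List.dropWhile_sublist _)
    have hgt : ∀ x ∈ rest.dropWhile (fun x => x == w), w < x := by
      intro x hx
      cases hdc : rest.dropWhile (fun x => x == w) with
      | nil => rw [hdc] at hx; cases hx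
      | cons y ys =>
        have hy0 := List.head?_dropWhile_not (fun x => x == w) rest
        rw [hdc] at hy0
        simp only [List.head?_cons] at hy0
        have hy : y ≠ w := by simpa using hy0
        rw [hdc] at hpd
        have hyrest : y ∈ rest := (List.dropWhile_sublist _).mem (hdc ▸ List.mem_cons_self ..)
        have hwy : w < y := lt_of_le_of_ne (hwle y hyrest) (fun h => hy h.symm)
        rw [hdc] at hx
        rcases List.mem_cons.mp hx with h | h
        · exact h ▸ hwy
        · exact lt_of_lt_of_le hwy ((List.pairwise_cons.mp hpd).1 x h)
    have hwd : w ∉ rest.dropWhile (fun x => x == w) := fun h => lt_irrefl w (hgt w h)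
    have htw : ∀ b ∈ rest.takeWhile (fun x => x == w), w = b := by
      intro b hb
      have := List.mem_takeWhile_imp hb
      simp only [beq_iff_eq] at this
      exact this.symm
    have hrest : rest.takeWhile (fun x => x == w) ++ rest.dropWhile (fun x => x == w) = rest :=
      List.takeWhile_append_dropWhile
    obtain ⟨u, hu1, hu2, hu3, hu4⟩ := ih hpd
    have hc0 : rest.count w = (rest.takeWhile (fun x => x == w)).length := by
      conv_lhs => rw [← hrest]
      rw [List.count_append, List.count_eq_length.mpr htw, List.count_eq_zero.mpr hwd]
      simp
    have hcw : (w :: rest).count w = (rest.takeWhile (fun x => x == w)).length + 1 := by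
      rw [List.count_cons_self, hc0]
    have hck : ∀ k ∈ u, (rest.dropWhile (fun x => x == w)).count k = (w :: rest).count k := by
      intro k hk
      have hkd : k ∈ rest.dropWhile (fun x => x == w) := (hu4 k).mp hk
      have hkw : w ≠ k := ne_of_lt (hgt k hkd)
      have hkt : k ∉ rest.takeWhile (fun x => x == w) := fun h => hkw (htw k h)
      have hc1 : rest.count k = (rest.dropWhile (fun x => x == w)).count k := by
        conv_lhs => rw [← hrest]
        rw [List.count_append, List.count_eq_zero.mpr hkt]
        simp
      rw [List.count_cons, hc1]
      simp [hkw]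
    refine ⟨w :: u, ?_, ?_, ?_, ?_⟩
    · rw [pvRuns]
      simp only [List.map_cons, List.cons.injEq]
      constructor
      · unfold pvEntry
        rw [hcw]
        push_cast
        rfl
      · rw [hu1]
        refine List.map_congr_left ?_
        intro k hk
        rw [hck k hk]
    · exact List.pairwise_cons.mpr ⟨fun x hx => hgt x ((hu4 x).mp hx), hu2⟩
    · exact List.nodup_cons.mpr ⟨fun h => lt_irrefl w (hgt w ((hu4 w).mp h)), hu3⟩
    · intro x
      simp only [List.mem_cons, hu4]
      constructor
      · rintro (h | h)
        · exact Or.inl h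
        · exact Or.inr ((List.dropWhile_sublist _).mem h)
      · rintro (h | h)
        · exact Or.inl h
        · rw [← hrest] at h
          rcases List.mem_append.mp h with h | h
          · exact Or.inl (htw x h).symm
          · exact Or.inr h

theorem pv_main (text : String) : get_word_counts text = get_word_counts_alt text := by
  unfold get_word_counts get_word_counts_alt
  simp only [pvCounter_eq, PySem.Dict.keys_counter, PySem.Dict.getD_counter]
  have hsp : (PySem.List.sorted (PySem.Str.split₀ text) (fun w => w)).Pairwise (· ≤ ·) :=
    PySem.List.sorted_pairwise (PySem.Str.split₀ text) (fun w => w)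
  obtain ⟨u, hu1, hu2, hu3, hu4⟩ := pvRuns_spec _ hsp
  have hmemsl : ∀ x : String,
      x ∈ PySem.List.sorted (PySem.Str.split₀ text) (fun w => w) ↔ x ∈ PySem.Str.split₀ text :=
    fun x => (PySem.List.sorted_perm (PySem.Str.split₀ text) (fun w => w) false).mem_iff
  have hperm : u.Perm (PySem.Set.ofList (PySem.Str.split₀ text)) :=
    (List.perm_ext_iff_of_nodup hu3 (PySem.Set.nodup_ofList _)).mpr
      (fun a => by rw [hu4, hmemsl, PySem.Set.mem_ofList])
  have hks : PySem.List.sorted (PySem.Set.ofList (PySem.Str.split₀ text)) (fun k => k) = u :=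
    PySem.List.sorted_eq_of_perm_of_pairwise_lt _ u _ hperm hu2
  rw [hks, hu1, pvFoldl_append_map]
  refine PySem.List.foldl_congr_mem _ _ _ _ ?_
  intro acc k hk
  have hcount : (PySem.List.sorted (PySem.Str.split₀ text) (fun w => w)).count k
      = (PySem.Str.split₀ text).count k :=
    (PySem.List.sorted_perm (PySem.Str.split₀ text) (fun w => w) false).count_eq k
  rw [hcount]
  unfold pvEntry
  simp [String.append_assoc]

-- ===== VERDICT (by name: the statement is the Claim_ definition above) =====
theorem get_word_counts_spec : Claim_equal_get_word_counts := by
  intro text _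
  unfold Spec_get_word_counts
  exact pv_main text
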